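-- pv_equiv track=rewrite | github.com/firstofthekind/smart-changelog | smart_changelog/updater.py | _categorize_from_labels
-- ===== SOURCE A (Python) =====
-- from typing import Any, Dict, List, Optional, Set, Tuple
--
-- def _categorize_from_labels(labels: Optional[List[str]]) -> Optional[str]:
--     if not labels:
--         return None
--
--     for label in labels:
--         normalized = label.lower()
--         if "bug" in normalized or normalized.startswith("fix"):
--             return "fix"
--         if "feature" in normalized or normalized.startswith("feat"):
--             return "feature"
--         if any(token in normalized for token in ["chore", "maintenance", "refactor", "doc", "change", "improv", "enhanc"]):
--             return "change"
--     return None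
-- ===== SOURCE B (Python) =====
-- # Staged passes + argmin: find the first label index at which each category
-- # matches, then return the category with the smallest index (ties keep the
-- # fix > feature > change priority because comparisons are strict).
--
-- def _is_fix(s):
--     return "bug" in s or s.startswith("fix")
--
-- def _is_feature(s):
--     return "feature" in s or s.startswith("feat")
--
-- def _is_change(s):
--     return any(t in s for t in ("chore", "maintenance", "refactor", "doc", "change", "improv", "enhanc"))
--
-- def _first_index(labels, pred):
--     for i, label in enumerate(labels):
--         if pred(label.lower()):
--             return i
--     return len(labels)
--
-- def _categorize_from_labels(labels):
--     if not labels: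
--         return None
--     best, cat = _first_index(labels, _is_fix), "fix"
--     i_feat = _first_index(labels, _is_feature)
--     if i_feat < best:
--         best, cat = i_feat, "feature"
--     i_chg = _first_index(labels, _is_change)
--     if i_chg < best:
--         best, cat = i_chg, "change"
--     return cat if best < len(labels) else None
-- ===== Notes on version B (the rewrite author's own statement) =====
-- stated objective: alternative
-- what changed: A makes one pass over the labels testing the three categories in priority order per label; B instead runs three staged passes computing the first matching label index for each category and then takes an explicit argmin with strict comparisons so ties keep the fix>feature>change priority.
import Mathlib
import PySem

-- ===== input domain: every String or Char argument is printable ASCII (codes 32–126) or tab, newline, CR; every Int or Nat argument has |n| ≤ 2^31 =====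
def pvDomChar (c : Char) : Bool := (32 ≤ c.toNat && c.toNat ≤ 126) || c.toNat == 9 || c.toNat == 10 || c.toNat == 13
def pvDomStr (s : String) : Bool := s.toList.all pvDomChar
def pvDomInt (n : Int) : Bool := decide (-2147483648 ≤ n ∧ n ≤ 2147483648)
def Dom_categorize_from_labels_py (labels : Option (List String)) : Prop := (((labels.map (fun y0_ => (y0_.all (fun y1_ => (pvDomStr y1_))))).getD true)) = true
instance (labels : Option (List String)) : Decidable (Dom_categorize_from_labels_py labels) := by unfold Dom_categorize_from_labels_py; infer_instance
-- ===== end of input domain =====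

-- B replaces A's single pass with a per-label priority chain by three staged passes (first matching index per category) followed by an explicit argmin with priority tie-breaking (alternative decomposition; same cost).


-- ===== PORT A =====
-- loop over labels, the three literal branches in A's order
def pvCatALoop : List String → Option String
  | [] => none
  | label :: rest =>
    let normalized := PySem.Str.lower label
    if PySem.Str.isIn "bug" normalized || PySem.Str.startswith normalized "fix" then some "fix"
    else if PySem.Str.isIn "feature" normalized || PySem.Str.startswith normalized "feat" then some "feature"
    else if (["chore", "maintenance", "refactor", "doc", "change", "improv", "enhanc"].any
              (fun token => PySem.Str.isIn token normalized)) then some "change"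
    else pvCatALoop rest

def categorize_from_labels_py (labels : Option (List String)) : Option String :=
  match labels with
  | none => none
  | some ls => if ls = [] then none else pvCatALoop ls

-- ===== PORT B =====
-- the three category predicates of Source B
def pvIsFix (s : String) : Bool :=
  PySem.Str.isIn "bug" s || PySem.Str.startswith s "fix"
def pvIsFeature (s : String) : Bool :=
  PySem.Str.isIn "feature" s || PySem.Str.startswith s "feat"
def pvIsChange (s : String) : Bool :=
  ["chore", "maintenance", "refactor", "doc", "change", "improv", "enhanc"].any
    (fun t => PySem.Str.isIn t s)

-- _first_index: index of the first label whose lowercase matches pred, else len(labels)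
def pvFirstIndex (pred : String → Bool) : List String → Nat
  | [] => 0
  | label :: rest => if pred (PySem.Str.lower label) then 0 else pvFirstIndex pred rest + 1

def categorize_from_labels_py_alt (labels : Option (List String)) : Option String :=
  match labels with
  | none => none
  | some ls =>
    if ls = [] then none
    else
      let bc0 : Nat × String := (pvFirstIndex pvIsFix ls, "fix")
      let iFeat := pvFirstIndex pvIsFeature ls
      let bc1 := if iFeat < bc0.1 then (iFeat, "feature") else bc0
      let iChg := pvFirstIndex pvIsChange ls
      let bc2 := if iChg < bc1.1 then (iChg, "change") else bc1
      if bc2.1 < ls.length then some bc2.2 else none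

-- ===== PRECONDITION & SPEC =====
def Spec_categorize_from_labels_py (labels : Option (List String)) (out : Option String) : Prop := out = categorize_from_labels_py_alt labels
instance (labels : Option (List String)) (out : Option String) : Decidable (Spec_categorize_from_labels_py labels out) := by unfold Spec_categorize_from_labels_py; infer_instance

-- ===== CLAIM (what is proved, stated in full; the proofs are below) =====
def Claim_equal_categorize_from_labels_py : Prop := ∀ (labels : Option (List String)), Dom_categorize_from_labels_py labels → Spec_categorize_from_labels_py labels (categorize_from_labels_py labels)

-- ===== LEMMAS AND PROOFS =====
-- B's argmin body, as a function of the list (used only by the proofs)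
def pvPick (ls : List String) : Option String :=
  let bc0 : Nat × String := (pvFirstIndex pvIsFix ls, "fix")
  let iFeat := pvFirstIndex pvIsFeature ls
  let bc1 := if iFeat < bc0.1 then (iFeat, "feature") else bc0
  let iChg := pvFirstIndex pvIsChange ls
  let bc2 := if iChg < bc1.1 then (iChg, "change") else bc1
  if bc2.1 < ls.length then some bc2.2 else none

-- definitional: A's three branch conditions are exactly B's predicates
theorem pvCatALoop_cons (label : String) (rest : List String) :
    pvCatALoop (label :: rest) =
      (if pvIsFix (PySem.Str.lower label) then some "fix"
       else if pvIsFeature (PySem.Str.lower label) then some "feature"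
       else if pvIsChange (PySem.Str.lower label) then some "change"
       else pvCatALoop rest) := rfl

theorem pvFirstIndex_le (pred : String → Bool) (ls : List String) :
    pvFirstIndex pred ls ≤ ls.length := by
  induction ls with
  | nil => simp [pvFirstIndex]
  | cons l rest ih => simp only [pvFirstIndex, List.length_cons]; split <;> omega

theorem pvLoop_eq_pick (ls : List String) : pvCatALoop ls = pvPick ls := by
  induction ls with
  | nil => rfl
  | cons label rest ih =>
    have hf := pvFirstIndex_le pvIsFix rest
    have hg := pvFirstIndex_le pvIsFeature rest
    have hc := pvFirstIndex_le pvIsChange rest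
    rw [pvCatALoop_cons, ih]
    simp only [pvPick, pvFirstIndex, List.length_cons]
    by_cases h0 : pvIsFix (PySem.Str.lower label) = true
    · simp only [h0, if_true]
      split_ifs <;> simp_all
    · by_cases h1 : pvIsFeature (PySem.Str.lower label) = true
      · simp only [h0, h1, if_true, Bool.false_eq_true, if_false]
        split_ifs <;> simp_all
      · by_cases h2 : pvIsChange (PySem.Str.lower label) = true
        · simp only [h0, h1, h2, if_true, Bool.false_eq_true, if_false]
          split_ifs <;> simp_all
        · simp only [h0, h1, h2, Bool.false_eq_true, if_false]
          split_ifs <;> simp_all <;> omega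

-- ===== VERDICT (by name: the statement is the Claim_ definition above) =====
theorem categorize_from_labels_py_spec : Claim_equal_categorize_from_labels_py := by
  intro labels _
  unfold Spec_categorize_from_labels_py categorize_from_labels_py categorize_from_labels_py_alt
  cases labels with
  | none => rfl
  | some ls =>
    by_cases h : ls = []
    · simp [h]
    · simp only [h, if_false]
      simpa [pvPick] using pvLoop_eq_pick ls
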